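-- pv_equiv track=rewrite | github.com/MrBrantCode/unitest_baseline | mut_generate/mist_train_cf/cf_53766/solution.py | match_strings
-- ===== SOURCE A (Python) =====
-- def match_strings(lst):
--     special_chars = "!@#$%^&*()[]{}:;<>,.?/~+=|\\`~"
--     alphabets = "ABCDEFabcdef"
--
--     result = []
--     for string in lst:
--         has_alpha = any(char in alphabets for char in string)
--         has_special = any(char in special_chars for char in string)
--         if has_alpha and has_special:
--             result.append(string)
--     return result
-- ===== SOURCE B (Python) =====
-- def match_strings(lst):
--     # Build a classification table once: bit 1 = "alphabet" char, bit 2 = special char.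
--     cls = {}
--     for c in "ABCDEFabcdef":
--         cls[c] = 1
--     for c in "!@#$%^&*()[]{}:;<>,.?/~+=|\\`~":
--         cls[c] = 2
--
--     def mask(s):
--         m = 0
--         for ch in s:
--             m |= cls.get(ch, 0)
--         return m
--
--     return [s for s in lst if mask(s) == 3]
-- ===== Notes on version B (the rewrite author's own statement) =====
-- stated objective: faster
-- what changed: Replaces the two linear membership any() scans per string with a one-time classification dictionary mapping each character to a class bit (1=alpha, 2=special) and a single bitwise-OR fold over each string, keeping strings whose mask equals 3, emitted via a list comprehension instead of an append loop.
import Mathlib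
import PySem

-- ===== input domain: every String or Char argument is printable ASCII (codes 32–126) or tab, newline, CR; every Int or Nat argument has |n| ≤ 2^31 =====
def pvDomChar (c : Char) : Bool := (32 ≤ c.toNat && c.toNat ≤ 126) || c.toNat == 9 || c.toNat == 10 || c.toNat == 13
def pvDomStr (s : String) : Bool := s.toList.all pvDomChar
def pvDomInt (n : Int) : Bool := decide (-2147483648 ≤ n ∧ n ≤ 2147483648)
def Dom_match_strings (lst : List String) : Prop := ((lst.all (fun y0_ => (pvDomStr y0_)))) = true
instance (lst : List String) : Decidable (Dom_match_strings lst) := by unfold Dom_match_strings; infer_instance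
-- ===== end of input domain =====

-- B builds a one-time character→class-bit dictionary and keeps strings whose bitwise-OR mask is 3, instead of A's two any() membership scans; alternative decomposition, same asymptotic cost.

-- ===== PORT A =====
def pvSpecialCharsA : List Char := "!@#$%^&*()[]{}:;<>,.?/~+=|\\`~".toList
def pvAlphabetsA : List Char := "ABCDEFabcdef".toList

def match_strings (lst : List String) : List String :=
  lst.foldl (fun result string =>
    let has_alpha := string.toList.any (fun c => pvAlphabetsA.contains c)
    let has_special := string.toList.any (fun c => pvSpecialCharsA.contains c)
    if has_alpha && has_special then result ++ [string] else result) []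

-- ===== PORT B =====
def pvAlpha : List Char := "ABCDEFabcdef".toList
def pvSpecial : List Char := "!@#$%^&*()[]{}:;<>,.?/~+=|\\`~".toList

-- the classification dict: 1 for alpha chars, 2 for special chars
def pvCls : PySem.Dict Char Int :=
  pvSpecial.foldl (fun d c => d.insert c 2)
    (pvAlpha.foldl (fun d c => d.insert c 1) PySem.Dict.empty)

-- m |= cls.get(ch, 0) over the string
def pvMask (cs : List Char) : Int :=
  cs.foldl (fun m ch => PySem.Int.bor m (pvCls.getD ch 0)) 0

def match_strings_alt (lst : List String) : List String :=
  lst.filter (fun s => pvMask s.toList == 3)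

-- ===== PRECONDITION & SPEC =====
def Spec_match_strings (lst : List String) (out : List String) : Prop := out = match_strings_alt lst
instance (lst : List String) (out : List String) : Decidable (Spec_match_strings lst out) := by unfold Spec_match_strings; infer_instance

-- ===== CLAIM (what is proved, stated in full; the proofs are below) =====
def Claim_equal_match_strings : Prop := ∀ (lst : List String), Dom_match_strings lst → Spec_match_strings lst (match_strings lst)

-- ===== LEMMAS AND PROOFS =====
set_option maxRecDepth 100000 in
theorem pvAlpha_eq : pvAlpha = ['A','B','C','D','E','F','a','b','c','d','e','f'] := by decide

set_option maxRecDepth 100000 in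
theorem pvSpecial_eq :
    pvSpecial = ['!','@','#','$','%','^','&','*','(',')','[',']','{','}',':',';','<','>',',','.','?','/','~','+','=','|','\\','`','~'] := by decide

set_option maxRecDepth 100000 in
theorem pvCls_getD (c : Char) :
    pvCls.getD c 0 =
      (if pvAlpha.contains c then (1 : Int) else 0) +
      (if pvSpecial.contains c then (2 : Int) else 0) := by
  by_cases h1 : c ∈ pvAlpha
  · rw [pvAlpha_eq] at h1
    simp only [List.mem_cons, List.not_mem_nil, or_false] at h1
    rcases h1 with rfl|rfl|rfl|rfl|rfl|rfl|rfl|rfl|rfl|rfl|rfl|rfl <;> decide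
  · by_cases h2 : c ∈ pvSpecial
    · rw [pvSpecial_eq] at h2
      simp only [List.mem_cons, List.not_mem_nil, or_false] at h2
      rcases h2 with rfl|rfl|rfl|rfl|rfl|rfl|rfl|rfl|rfl|rfl|rfl|rfl|rfl|rfl|rfl|rfl|rfl|rfl|rfl|rfl|rfl|rfl|rfl|rfl|rfl|rfl|rfl|rfl|rfl <;> decide
    · rw [pvAlpha_eq] at h1
      rw [pvSpecial_eq] at h2
      simp only [List.mem_cons, List.not_mem_nil, or_false, not_or] at h1 h2
      obtain ⟨a1,a2,a3,a4,a5,a6,a7,a8,a9,a10,a11,a12⟩ := h1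
      obtain ⟨b1,b2,b3,b4,b5,b6,b7,b8,b9,b10,b11,b12,b13,b14,b15,b16,b17,b18,b19,b20,b21,b22,b23,b24,b25,b26,b27,b28,_⟩ := h2
      rw [show pvCls = pvCls from rfl]
      simp [pvCls, pvAlpha_eq, pvSpecial_eq, List.foldl, PySem.Dict.getD_insert, PySem.Dict.getD_empty,
        List.contains_eq_mem,
        a1,a2,a3,a4,a5,a6,a7,a8,a9,a10,a11,a12,
        b1,b2,b3,b4,b5,b6,b7,b8,b9,b10,b11,b12,b13,b14,b15,b16,b17,b18,b19,b20,b21,b22,b23,b24,b25,b26,b27,b28]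

theorem pvMask_fold (cs : List Char) (a s : Bool) :
    cs.foldl (fun m ch => PySem.Int.bor m (pvCls.getD ch 0))
        ((if a then (1 : Int) else 0) + (if s then (2 : Int) else 0)) =
      (if (a || cs.any (fun c => pvAlpha.contains c)) then (1 : Int) else 0) +
      (if (s || cs.any (fun c => pvSpecial.contains c)) then (2 : Int) else 0) := by
  induction cs generalizing a s with
  | nil => simp
  | cons c rest ih =>
    simp only [List.foldl_cons, List.any_cons]
    have step : PySem.Int.bor ((if a then (1 : Int) else 0) + (if s then (2 : Int) else 0))
        (pvCls.getD c 0) =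
        ((if (a || pvAlpha.contains c) then (1 : Int) else 0) +
         (if (s || pvSpecial.contains c) then (2 : Int) else 0)) := by
      rw [pvCls_getD]
      cases a <;> cases s <;> cases hA : pvAlpha.contains c <;> cases hS : pvSpecial.contains c <;>
        decide
    rw [step, ih]
    simp [Bool.or_assoc]

theorem pvMask_spec (cs : List Char) :
    pvMask cs =
      (if cs.any (fun c => pvAlpha.contains c) then (1 : Int) else 0) +
      (if cs.any (fun c => pvSpecial.contains c) then (2 : Int) else 0) := by
  have h := pvMask_fold cs false false
  simpa [pvMask] using h

theorem pvMask_eq_three (cs : List Char) :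
    (pvMask cs == 3) =
      (cs.any (fun c => pvAlphabetsA.contains c) && cs.any (fun c => pvSpecialCharsA.contains c)) := by
  rw [show pvAlphabetsA = pvAlpha from rfl, show pvSpecialCharsA = pvSpecial from rfl,
    pvMask_spec]
  cases cs.any (fun c => pvAlpha.contains c) <;> cases cs.any (fun c => pvSpecial.contains c) <;> decide

-- ===== VERDICT (by name: the statement is the Claim_ definition above) =====
theorem match_strings_spec : Claim_equal_match_strings := by
  intro lst _
  unfold Spec_match_strings match_strings match_strings_alt
  rw [PySem.List.foldl_append_if_eq_filter]
  simp only [List.nil_append]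
  apply List.filter_congr
  intro s _
  rw [pvMask_eq_three]
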